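-- pv_equiv track=rewrite | github.com/jwu2019/synthesia-translator | main.py | CreateKeyGroups
-- ===== SOURCE A (Python) =====
-- def CreateKeyGroups(row, width, keyThreshold, keyLength):
--     dark = True # True if last pixel was black
--     keyGroups = [[0]] # Bounds for keys
--     for i in range(len(row)):
--         # Row changes from light to dark or dark to light
--         if (dark and row[i]>=keyThreshold) or (not dark and row[i]<keyThreshold):
--             if (i-keyGroups[-1][0]<keyLength):
--                 keyGroups.pop()
--             else:
--                 keyGroups[-1].append(i-1)
--             keyGroups.append([i])
--             dark = not dark
--     if(width-keyGroups[-1][0]<keyLength):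
--         keyGroups.pop()
--     else:
--         keyGroups[-1].append(width)
--     return keyGroups
-- ===== SOURCE B (Python) =====
-- def CreateKeyGroups(row, width, keyThreshold, keyLength):
--     # Pass 1: collect dark/light transition indices.
--     transitions = []
--     dark = True
--     for i, px in enumerate(row):
--         if (px >= keyThreshold) == dark:
--             transitions.append(i)
--             dark = not dark
--     # Pass 2: build intervals between consecutive boundaries.
--     result = []
--     start = 0
--     for t in transitions:
--         if t - start >= keyLength:
--             result.append([start, t - 1])
--         start = t
--     if width - start >= keyLength:
--         result.append([start, width])
--     return result
-- ===== Notes on version B (the rewrite author's own statement) =====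
-- stated objective: simpler
-- what changed: Replaces A's single stateful pass that mutates the last group in place with pop/append-to-last by two plain passes: first collect the transition indices, then build the intervals between consecutive boundaries with append-only logic.
import Mathlib
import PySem

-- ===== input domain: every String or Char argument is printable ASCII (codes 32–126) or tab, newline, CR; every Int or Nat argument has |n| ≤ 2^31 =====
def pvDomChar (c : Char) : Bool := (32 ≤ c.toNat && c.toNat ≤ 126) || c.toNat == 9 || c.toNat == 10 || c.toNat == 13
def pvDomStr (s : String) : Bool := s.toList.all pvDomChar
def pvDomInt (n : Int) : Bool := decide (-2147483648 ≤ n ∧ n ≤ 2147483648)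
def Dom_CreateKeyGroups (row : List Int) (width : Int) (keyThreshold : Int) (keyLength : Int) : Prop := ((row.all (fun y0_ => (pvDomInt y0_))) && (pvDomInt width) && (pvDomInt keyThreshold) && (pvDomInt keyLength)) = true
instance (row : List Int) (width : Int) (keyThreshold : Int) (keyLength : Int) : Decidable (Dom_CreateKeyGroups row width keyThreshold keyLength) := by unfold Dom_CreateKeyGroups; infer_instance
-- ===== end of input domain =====

-- B replaces A's single stateful pass (with in-place pop/append on the last group) by two
-- append-only passes: collect transition indices, then build the intervals between boundaries (simpler).

-- ===== PORT A =====
def CreateKeyGroups (row : List Int) (width : Int) (keyThreshold : Int) (keyLength : Int) : List (List Int) :=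
  let st := (PySem.List.pyRange 0 (row.length : Int) 1).foldl
    (fun (st : Bool × List (List Int)) i =>
      let dark := st.1
      let keyGroups := st.2
      if (dark && decide (PySem.List.pyGetD row i 0 ≥ keyThreshold))
          || (!dark && decide (PySem.List.pyGetD row i 0 < keyThreshold)) then
        let keyGroups :=
          if i - PySem.List.pyGetD (PySem.List.pyGetD keyGroups (-1) []) 0 0 < keyLength then
            keyGroups.dropLast                                  -- keyGroups.pop()
          else
            keyGroups.dropLast ++ [keyGroups.getLastD [] ++ [i - 1]]  -- keyGroups[-1].append(i-1)
        (!dark, keyGroups ++ [[i]])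
      else st)
    (true, [[(0 : Int)]])
  let keyGroups := st.2
  if width - PySem.List.pyGetD (PySem.List.pyGetD keyGroups (-1) []) 0 0 < keyLength then
    keyGroups.dropLast
  else
    keyGroups.dropLast ++ [keyGroups.getLastD [] ++ [width]]

-- ===== PORT B =====
-- B-side helpers: the two loop bodies of Source B (pass 1 and pass 2), named
def bStep1 (keyThreshold : Int) (st : Bool × List Int) (p : Int × Int) : Bool × List Int :=
  if decide (p.2 ≥ keyThreshold) == st.1 then (!st.1, st.2 ++ [p.1]) else st

def bStep2 (keyLength : Int) (st : Int × List (List Int)) (t : Int) : Int × List (List Int) :=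
  (t, if t - st.1 ≥ keyLength then st.2 ++ [[st.1, t - 1]] else st.2)

def CreateKeyGroups_alt (row : List Int) (width : Int) (keyThreshold : Int) (keyLength : Int) : List (List Int) :=
  -- Pass 1: collect transition indices
  let p1 := (PySem.List.enumerate row 0).foldl (bStep1 keyThreshold) (true, [])
  -- Pass 2: build intervals between consecutive boundaries
  let p2 := p1.2.foldl (bStep2 keyLength) ((0 : Int), [])
  if width - p2.1 ≥ keyLength then p2.2 ++ [[p2.1, width]] else p2.2

-- ===== PRECONDITION & SPEC =====
def Spec_CreateKeyGroups (row : List Int) (width : Int) (keyThreshold : Int) (keyLength : Int) (out : List (List Int)) : Prop := out = CreateKeyGroups_alt row width keyThreshold keyLength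
instance (row : List Int) (width : Int) (keyThreshold : Int) (keyLength : Int) (out : List (List Int)) : Decidable (Spec_CreateKeyGroups row width keyThreshold keyLength out) := by unfold Spec_CreateKeyGroups; infer_instance

-- ===== CLAIM (what is proved, stated in full; the proofs are below) =====
def Claim_equal_CreateKeyGroups : Prop := ∀ (row : List Int) (width : Int) (keyThreshold : Int) (keyLength : Int), Dom_CreateKeyGroups row width keyThreshold keyLength → Spec_CreateKeyGroups row width keyThreshold keyLength (CreateKeyGroups row width keyThreshold keyLength)

-- ===== LEMMAS AND PROOFS =====

-- Named copies of the fold bodies (A's, taken over (index, pixel) pairs; B's two passes).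
def aStep (keyThreshold keyLength : Int) (st : Bool × List (List Int)) (p : Int × Int) : Bool × List (List Int) :=
  if (st.1 && decide (p.2 ≥ keyThreshold)) || (!st.1 && decide (p.2 < keyThreshold)) then
    let keyGroups :=
      if p.1 - PySem.List.pyGetD (PySem.List.pyGetD st.2 (-1) []) 0 0 < keyLength then
        st.2.dropLast
      else
        st.2.dropLast ++ [st.2.getLastD [] ++ [p.1 - 1]]
    (!st.1, keyGroups ++ [[p.1]])
  else st

-- internal groups produced between consecutive boundaries, starting at s
def intern (keyLength : Int) : Int → List Int → List (List Int)
  | _, [] => []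
  | s, t :: ts => (if t - s ≥ keyLength then [[s, t - 1]] else []) ++ intern keyLength t ts

theorem bfold1_acc (kt : Int) (l : List (Int × Int)) : ∀ (d : Bool) (acc : List Int),
    l.foldl (bStep1 kt) (d, acc) =
      ((l.foldl (bStep1 kt) (d, [])).1, acc ++ (l.foldl (bStep1 kt) (d, [])).2) := by
  induction l with
  | nil => intro d acc; simp
  | cons p l ih =>
    intro d acc
    simp only [List.foldl_cons, bStep1]
    by_cases h : (decide (p.2 ≥ kt) == d) = true
    · simp only [h, if_true]
      rw [ih (!d) (acc ++ [p.1]), ih (!d) ([] ++ [p.1])]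
      simp
    · simp only [if_neg h, ih d acc]

theorem bfold2_eq (kl : Int) (ts : List Int) : ∀ (s : Int) (res : List (List Int)),
    ts.foldl (bStep2 kl) (s, res) = (ts.getLastD s, res ++ intern kl s ts) := by
  induction ts with
  | nil => intro s res; simp [intern]
  | cons t ts ih =>
    intro s res
    simp only [List.foldl_cons, bStep2, ih t, intern, List.getLastD_cons]
    by_cases h : t - s ≥ kl
    · simp [h]
    · simp [h]

theorem cond_eq (kt : Int) (d : Bool) (px : Int) :
    ((d && decide (px ≥ kt)) || (!d && decide (px < kt))) = (decide (px ≥ kt) == d) := by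
  by_cases h : px ≥ kt
  · have h' : ¬ px < kt := by omega
    cases d <;> simp [h, h']
  · have h' : px < kt := by omega
    cases d <;> simp [h, h']

theorem lastD_cons (xs : List Int) (a b : Int) :
    (a :: xs).getLast?.getD b = xs.getLast?.getD a := by
  rw [← List.getLastD_eq_getLast?, ← List.getLastD_eq_getLast?, List.getLastD_cons]

theorem main_inv (kt kl : Int) (l : List (Int × Int)) : ∀ (d : Bool) (G : List (List Int)) (L : Int),
    l.foldl (aStep kt kl) (d, G ++ [[L]]) =
      ((l.foldl (bStep1 kt) (d, [])).1,
        G ++ intern kl L (l.foldl (bStep1 kt) (d, [])).2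
          ++ [[((l.foldl (bStep1 kt) (d, [])).2).getLastD L]]) := by
  induction l with
  | nil => intro d G L; simp [intern]
  | cons p l ih =>
    intro d G L
    simp only [List.foldl_cons, aStep, bStep1, cond_eq kt d p.2]
    by_cases hc : (decide (p.2 ≥ kt) == d) = true
    · simp only [hc, if_true]
      rw [bfold1_acc kt l (!d) ([] ++ [p.1])]
      simp only [PySem.List.pyGetD_neg_one_append_singleton, PySem.List.pyGetD_zero_cons,
        List.dropLast_concat, List.getLastD_concat, List.nil_append]
      by_cases hkl : p.1 - L < kl
      · have hni : ¬ p.1 - L ≥ kl := by omega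
        rw [if_pos hkl, ih (!d) G p.1]
        simp [intern, hni, lastD_cons]
      · have hi : p.1 - L ≥ kl := by omega
        rw [if_neg hkl]
        have : (G ++ [[L] ++ [p.1 - 1]]) ++ [[p.1]] = (G ++ [[L, p.1 - 1]]) ++ [[p.1]] := by simp
        rw [this, ih (!d) (G ++ [[L, p.1 - 1]]) p.1]
        simp [intern, hi, lastD_cons]
    · simp only [if_neg hc, ih d G L]

theorem aport_fold (row : List Int) (kt kl : Int) :
    (PySem.List.pyRange 0 (row.length : Int) 1).foldl
      (fun (st : Bool × List (List Int)) i =>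
        if (st.1 && decide (PySem.List.pyGetD row i 0 ≥ kt))
            || (!st.1 && decide (PySem.List.pyGetD row i 0 < kt)) then
          let keyGroups :=
            if i - PySem.List.pyGetD (PySem.List.pyGetD st.2 (-1) []) 0 0 < kl then
              st.2.dropLast
            else
              st.2.dropLast ++ [st.2.getLastD [] ++ [i - 1]]
          (!st.1, keyGroups ++ [[i]])
        else st)
      (true, [[(0 : Int)]])
    = (PySem.List.enumerate row 0).foldl (aStep kt kl) (true, [[(0 : Int)]]) := by
  rw [PySem.List.enumerate_eq_map_pyRange (d := 0), List.foldl_map]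
  rfl

theorem CreateKeyGroups_spec : Claim_equal_CreateKeyGroups := by
  unfold Claim_equal_CreateKeyGroups Spec_CreateKeyGroups
  intro row width kt kl _
  simp only [CreateKeyGroups, CreateKeyGroups_alt]
  rw [aport_fold row kt kl]
  have hmain := main_inv kt kl (PySem.List.enumerate row 0) true [] 0
  simp only [List.nil_append] at hmain
  rw [hmain, bfold2_eq]
  simp only [PySem.List.pyGetD_neg_one_append_singleton, PySem.List.pyGetD_zero_cons,
    List.dropLast_concat, List.getLastD_concat, List.nil_append]
  set T := ((PySem.List.enumerate row 0).foldl (bStep1 kt) (true, [])).2 with hT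
  by_cases h : width - T.getLastD 0 < kl
  · rw [if_pos h, if_neg (by omega)]
  · rw [if_neg h, if_pos (by omega)]
    simp
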